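-- pv_equiv track=rewrite | github.com/marcosd4h/DeepExtractRuntime | hooks/grind-until-done.py | _strip_fenced_code_blocks
-- ===== SOURCE A (Python) =====
-- def _strip_fenced_code_blocks(content: str) -> str:
--     """Remove fenced-code block bodies before checkbox parsing."""
--     lines: list[str] = []
--     in_fence = False
--     for line in content.splitlines():
--         stripped = line.strip()
--         if stripped.startswith("```"):
--             in_fence = not in_fence
--             continue
--         if not in_fence:
--             lines.append(line)
--     return "\n".join(lines)
-- ===== SOURCE B (Python) =====
-- def _strip_fenced_code_blocks(content: str) -> str:
--     """Remove fenced-code block bodies before checkbox parsing.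
--
--     Table-build-then-filter: mark fence lines, prefix-sum the markers,
--     keep each non-marker line whose preceding-marker count is even.
--     """
--     lines = content.splitlines()
--     markers = [ln.strip().startswith("```") for ln in lines]
--     prefix = []
--     c = 0
--     for m in markers:
--         prefix.append(c)
--         c += m
--     kept = [ln for (ln, m), p in zip(zip(lines, markers), prefix)
--             if not m and p % 2 == 0]
--     return "\n".join(kept)
-- ===== Notes on version B (the rewrite author's own statement) =====
-- stated objective: alternative
-- what changed: Replaces the single stateful in_fence toggle loop with a table-build-then-filter decomposition: a marker table, a prefix-sum of marker counts, and a parity filter over the zipped tables.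
import Mathlib
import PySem

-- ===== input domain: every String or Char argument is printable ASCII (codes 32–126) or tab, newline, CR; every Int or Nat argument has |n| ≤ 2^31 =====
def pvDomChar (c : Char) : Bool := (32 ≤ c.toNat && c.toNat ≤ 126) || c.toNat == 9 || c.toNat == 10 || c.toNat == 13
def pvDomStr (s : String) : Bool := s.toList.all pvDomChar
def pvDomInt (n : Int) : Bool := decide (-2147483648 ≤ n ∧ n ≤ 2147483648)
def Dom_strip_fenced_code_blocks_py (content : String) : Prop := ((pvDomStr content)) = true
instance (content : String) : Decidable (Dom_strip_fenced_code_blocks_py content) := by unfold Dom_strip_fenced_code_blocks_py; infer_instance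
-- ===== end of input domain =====

-- B replaces A's stateful in_fence toggle by a marker table + prefix-sum + parity filter (alternative decomposition, same cost).

-- ===== PORT A =====
-- literal port of A: fold over splitlines with state (kept lines, in_fence)
def strip_fenced_code_blocks_py (content : String) : String :=
  let st := (PySem.Str.splitlines content).foldl
    (fun (s : List String × Bool) line =>
      if PySem.Str.startswith (PySem.Str.strip line) "```" then (s.1, !s.2)
      else if !s.2 then (s.1 ++ [line], s.2) else s)
    ([], false)
  PySem.Str.join "\n" st.1

-- ===== PORT B =====
-- literal port of B: marker table, prefix-sum of markers, parity filter on the zipped tables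
def strip_fenced_code_blocks_py_alt (content : String) : String :=
  let lines := PySem.Str.splitlines content
  let markers := lines.map (fun ln => PySem.Str.startswith (PySem.Str.strip ln) "```")
  let pc := markers.foldl
    (fun (s : List Nat × Nat) m => (s.1 ++ [s.2], s.2 + (if m then 1 else 0)))
    (([] : List Nat), 0)
  let kept := (((lines.zip markers).zip pc.1).filter
      (fun t => !t.1.2 && t.2 % 2 == 0)).map (fun t => t.1.1)
  PySem.Str.join "\n" kept

-- ===== PRECONDITION & SPEC =====
def Spec_strip_fenced_code_blocks_py (content : String) (out : String) : Prop := out = strip_fenced_code_blocks_py_alt content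
instance (content : String) (out : String) : Decidable (Spec_strip_fenced_code_blocks_py content out) := by unfold Spec_strip_fenced_code_blocks_py; infer_instance

-- ===== CLAIM (what is proved, stated in full; the proofs are below) =====
def Claim_equal_strip_fenced_code_blocks_py : Prop := ∀ (content : String), Dom_strip_fenced_code_blocks_py content → Spec_strip_fenced_code_blocks_py content (strip_fenced_code_blocks_py content)

-- ===== LEMMAS AND PROOFS =====

-- the fence-marker test, shared by both ports
def pvMarker (l : String) : Bool := PySem.Str.startswith (PySem.Str.strip l) "```"

-- the lines kept, as one direct recursion with a running marker count
def pvKept : List String → Nat → List String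
  | [], _ => []
  | l :: ls, c =>
    if pvMarker l then pvKept ls (c + 1)
    else if c % 2 == 0 then l :: pvKept ls c else pvKept ls c

-- the recursive shape of B's prefix list
def pvPrefixes : List Bool → Nat → List Nat
  | [], _ => []
  | m :: ms, c => c :: pvPrefixes ms (c + (if m then 1 else 0))

lemma pvPrefix_foldl (ms : List Bool) (acc : List Nat) (c : Nat) :
    (ms.foldl (fun (s : List Nat × Nat) m => (s.1 ++ [s.2], s.2 + (if m then 1 else 0))) (acc, c)).1
      = acc ++ pvPrefixes ms c := by
  induction ms generalizing acc c with
  | nil => simp [pvPrefixes]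
  | cons m ms ih => simp [pvPrefixes, ih]

lemma pvB_eq_kept (ls : List String) (c : Nat) :
    (((ls.zip (ls.map pvMarker)).zip (pvPrefixes (ls.map pvMarker) c)).filter
        (fun t => !t.1.2 && t.2 % 2 == 0)).map (fun t => t.1.1) = pvKept ls c := by
  induction ls generalizing c with
  | nil => simp [pvKept]
  | cons l ls ih =>
    cases h : pvMarker l with
    | true => simp [pvPrefixes, pvKept, h, ih]
    | false =>
      by_cases hc : c % 2 = 0 <;>
        simp [pvPrefixes, pvKept, h, hc, ih]

lemma pvParity_flip (c : Nat) : (!(c % 2 == 1)) = ((c + 1) % 2 == 1) := by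
  rcases Nat.mod_two_eq_zero_or_one c with h | h <;> simp [Nat.add_mod, h]

lemma pvA_eq_kept (ls : List String) (acc : List String) (c : Nat) :
    (ls.foldl
      (fun (s : List String × Bool) line =>
        if pvMarker line then (s.1, !s.2)
        else if !s.2 then (s.1 ++ [line], s.2) else s)
      (acc, c % 2 == 1)).1 = acc ++ pvKept ls c := by
  induction ls generalizing acc c with
  | nil => simp [pvKept]
  | cons l ls ih =>
    cases h : pvMarker l with
    | true =>
      simp only [List.foldl_cons, h, if_pos, pvKept, pvParity_flip c]
      exact ih acc (c + 1)
    | false =>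
      rcases Nat.mod_two_eq_zero_or_one c with hc | hc
      · simp only [List.foldl_cons, h, pvKept, hc]
        simpa [hc] using (ih (acc ++ [l]) c)
      · simp only [List.foldl_cons, h, pvKept, hc]
        simpa [hc] using (ih acc c)

lemma pvMarker_def (l : String) :
    PySem.Str.startswith (PySem.Str.strip l) "```" = pvMarker l := rfl

-- ===== VERDICT (by name: the statement is the Claim_ definition above) =====
theorem strip_fenced_code_blocks_py_spec : Claim_equal_strip_fenced_code_blocks_py := by
  intro content _
  show strip_fenced_code_blocks_py content = strip_fenced_code_blocks_py_alt content
  simp only [strip_fenced_code_blocks_py, strip_fenced_code_blocks_py_alt, pvMarker_def]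
  rw [pvPrefix_foldl, List.nil_append, pvB_eq_kept]
  have h := pvA_eq_kept (PySem.Str.splitlines content) [] 0
  simpa using congrArg (PySem.Str.join "\n") h
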